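-- pv_equiv track=rewrite | github.com/PSSalgado/FoldKit | utils/cli_log.py | strip_log_args_from_argv
-- ===== SOURCE A (Python) =====
-- def strip_log_args_from_argv(argv: list[str]) -> tuple[list[str], dict[str, str | None]]:
--     """
--     Remove standard logging flags from argv.
--
--     Supports:
--     - --log FILE / --log=FILE
--     - --log (no value) -> "__AUTO__"
--
--     Returns (argv_without_log_flags, parsed_log_kwargs).
--     """
--     out: list[str] = []
--     parsed: dict[str, str | None] = {"log": None}
--
--     it = iter(range(len(argv)))
--     i = 0
--     while i < len(argv):
--         a = argv[i]
--         if a.startswith("--log="):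
--             parsed["log"] = a.split("=", 1)[1]
--             i += 1
--             continue
--         if a == "--log":
--             if i + 1 < len(argv):
--                 nxt = argv[i + 1]
--                 if nxt.startswith("-"):
--                     parsed["log"] = "__AUTO__"
--                     i += 1
--                     continue
--                 parsed["log"] = nxt
--                 i += 2
--                 continue
--             parsed["log"] = "__AUTO__"
--             i += 1
--             continue
--         out.append(a)
--         i += 1
--
--     return out, parsed
-- ===== SOURCE B (Python) =====
-- def strip_log_args_from_argv(argv: list[str]) -> tuple[list[str], dict[str, str | None]]:
--     """Single forward pass over the tokens themselves (no index lookahead):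
--     a pending flag remembers a bare --log whose value may come next."""
--     out: list[str] = []
--     val: str | None = None
--     pending = False
--     for a in argv:
--         if pending:
--             pending = False
--             if not a.startswith("-"):
--                 val = a
--                 continue
--             val = "__AUTO__"
--             # fall through: this dash token is processed normally below
--         if a.startswith("--log="):
--             val = a.split("=", 1)[1]
--         elif a == "--log":
--             pending = True
--         else:
--             out.append(a)
--     if pending:
--         val = "__AUTO__"
--     return out, {"log": val}
-- ===== Notes on version B (the rewrite author's own statement) =====
-- stated objective: simpler
-- what changed: Replaced the index-based while loop with lookahead (argv[i+1], i += 2) by a single for loop over the tokens with a pending flag that defers consumption of the value, last log value kept in a variable and the dict built once at the end.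
import Mathlib
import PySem

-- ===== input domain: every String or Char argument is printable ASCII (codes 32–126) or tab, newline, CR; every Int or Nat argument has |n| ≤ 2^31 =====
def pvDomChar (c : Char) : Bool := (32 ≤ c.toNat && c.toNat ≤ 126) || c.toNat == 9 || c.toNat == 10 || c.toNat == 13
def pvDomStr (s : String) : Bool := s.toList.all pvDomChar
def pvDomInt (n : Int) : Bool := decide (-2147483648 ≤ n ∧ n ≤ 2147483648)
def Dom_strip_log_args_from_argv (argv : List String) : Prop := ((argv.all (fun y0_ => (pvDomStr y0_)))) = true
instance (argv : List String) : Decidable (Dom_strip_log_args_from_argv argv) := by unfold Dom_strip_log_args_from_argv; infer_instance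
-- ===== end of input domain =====

-- B replaces A's index-based while loop with lookahead by one for loop over the
-- tokens with a pending flag; equivalence of the return values is proved below.

-- a.split("=", 1)[1] where a is known to contain '='; exact via PySem.Str.splitMax?
def pvSplitEqTail (a : String) : String :=
  (PySem.List.pyGet? ((PySem.Str.splitMax? a "=" 1).getD []) 1).getD ""

-- ===== PORT A =====
-- the while loop over index i, rendered on the suffix argv[i:] (a = head, argv[i+1] = second element; i += 1 / i += 2 drop one / two)
def stripA_go (rest out : List String) (parsed : PySem.Dict String (Option String)) :
    List String × (List (String × Option String)) :=
  match rest with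
  | [] => (out, parsed.items)
  | a :: r =>
    if PySem.Str.startswith a "--log=" then
      stripA_go r out (parsed.insert "log" (some (pvSplitEqTail a)))
    else if a = "--log" then
      match _hr : r with
      | nxt :: r2 =>
        if PySem.Str.startswith nxt "-" then
          stripA_go r out (parsed.insert "log" (some "__AUTO__"))
        else
          stripA_go r2 out (parsed.insert "log" (some nxt))
      | [] =>
        -- i += 1; continue: the loop guard now fails and the function returns
        (out, (parsed.insert "log" (some "__AUTO__")).items)
    else
      stripA_go r (out ++ [a]) parsed
termination_by rest.length
decreasing_by all_goals (simp_all only [List.length_cons]; omega)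

def strip_log_args_from_argv (argv : List String) : List String × (List (String × Option String)) :=
  stripA_go argv [] (PySem.Dict.ofList [("log", none)])

-- ===== PORT B =====
-- the if/elif/else chain of B's loop body (reached with pending already cleared)
def bChain (out : List String) (v : Option String) (a : String) :
    List String × Bool × Option String :=
  if PySem.Str.startswith a "--log=" then (out, false, some (pvSplitEqTail a))
  else if a = "--log" then (out, true, v)
  else (out ++ [a], false, v)

-- one iteration of B's for loop on state (out, pending, val)
def bStep (st : List String × Bool × Option String) (a : String) :
    List String × Bool × Option String :=
  if st.2.1 then
    if ¬ PySem.Str.startswith a "-" then (st.1, false, some a)  -- value consumed, continue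
    else bChain st.1 (some "__AUTO__") a                        -- fall through to the chain
  else bChain st.1 st.2.2 a

def strip_log_args_from_argv_alt (argv : List String) : List String × (List (String × Option String)) :=
  let st := argv.foldl bStep ([], false, none)
  (st.1, [("log", if st.2.1 then some "__AUTO__" else st.2.2)])

-- ===== PRECONDITION & SPEC =====
def Spec_strip_log_args_from_argv (argv : List String) (out : List String × (List (String × Option String))) : Prop := out = strip_log_args_from_argv_alt argv
instance (argv : List String) (out : List String × (List (String × Option String))) : Decidable (Spec_strip_log_args_from_argv argv out) := by unfold Spec_strip_log_args_from_argv; infer_instance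

-- ===== CLAIM (what is proved, stated in full; the proofs are below) =====
def Claim_equal_strip_log_args_from_argv : Prop := ∀ (argv : List String), Dom_strip_log_args_from_argv argv → Spec_strip_log_args_from_argv argv (strip_log_args_from_argv argv)

-- ===== LEMMAS AND PROOFS =====

-- A's parsed dict only ever overwrites the key "log"
lemma insert_log (v x : Option String) :
    (PySem.Dict.mk [("log", v)]).insert "log" x = PySem.Dict.mk [("log", x)] := by
  simp [PySem.Dict.insert]

-- "--log" itself does not start with "--log="
lemma chars_log : PySem.Chars.startswith ['-', '-', 'l', 'o', 'g'] ['-', '-', 'l', 'o', 'g', '='] = false := by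
  decide

-- unfolding equations of stripA_go (a well-founded definition), one per branch
lemma go_nil (out : List String) (parsed : PySem.Dict String (Option String)) :
    stripA_go [] out parsed = (out, parsed.items) := by
  rw [stripA_go.eq_def]

lemma go_cons_eq (a : String) (r out : List String) (parsed : PySem.Dict String (Option String))
    (h1 : PySem.Chars.startswith a.toList ['-', '-', 'l', 'o', 'g', '='] = true) :
    stripA_go (a :: r) out parsed = stripA_go r out (parsed.insert "log" (some (pvSplitEqTail a))) := by
  rw [stripA_go.eq_def]; simp [h1]

lemma go_cons_log_nil (out : List String) (parsed : PySem.Dict String (Option String)) :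
    stripA_go ["--log"] out parsed = (out, (parsed.insert "log" (some "__AUTO__")).items) := by
  rw [stripA_go.eq_def]; simp [chars_log]

lemma go_cons_log_dash (nxt : String) (r2 out : List String) (parsed : PySem.Dict String (Option String))
    (h3 : PySem.Chars.startswith nxt.toList ['-'] = true) :
    stripA_go ("--log" :: nxt :: r2) out parsed =
      stripA_go (nxt :: r2) out (parsed.insert "log" (some "__AUTO__")) := by
  rw [stripA_go.eq_def]; simp [chars_log, h3]

lemma go_cons_log_val (nxt : String) (r2 out : List String) (parsed : PySem.Dict String (Option String))
    (h3 : PySem.Chars.startswith nxt.toList ['-'] = false) :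
    stripA_go ("--log" :: nxt :: r2) out parsed = stripA_go r2 out (parsed.insert "log" (some nxt)) := by
  rw [stripA_go.eq_def]; simp [chars_log, h3]

lemma go_cons_other (a : String) (r out : List String) (parsed : PySem.Dict String (Option String))
    (h1 : PySem.Chars.startswith a.toList ['-', '-', 'l', 'o', 'g', '='] = false) (h2 : a ≠ "--log") :
    stripA_go (a :: r) out parsed = stripA_go r (out ++ [a]) parsed := by
  rw [stripA_go.eq_def]; simp [h1, h2]

-- loop invariant: A's indexed loop from state (out, {"log": v}) computes B's fold
lemma go_eq (n : Nat) : ∀ (rest : List String), rest.length ≤ n → ∀ (out : List String) (v : Option String),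
    stripA_go rest out (PySem.Dict.mk [("log", v)]) =
      (let st := rest.foldl bStep (out, false, v)
       (st.1, [("log", if st.2.1 then some "__AUTO__" else st.2.2)])) := by
  induction n with
  | zero =>
    intro rest h out v
    have : rest = [] := List.eq_nil_of_length_eq_zero (Nat.le_zero.mp h)
    subst this
    simp [go_nil]
  | succ n ih =>
    intro rest h out v
    match rest with
    | [] => simp [go_nil]
    | a :: r =>
      simp only [List.length_cons, Nat.succ_le_succ_iff] at h
      by_cases h1 : PySem.Chars.startswith a.toList ['-', '-', 'l', 'o', 'g', '='] = true
      · rw [go_cons_eq a r out _ h1, insert_log, ih r h]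
        have hs : bStep (out, false, v) a = (out, false, some (pvSplitEqTail a)) := by
          simp [bStep, bChain, h1]
        simp only [List.foldl_cons, hs]
      · by_cases h2 : a = "--log"
        · subst h2
          have hsA : bStep (out, false, v) "--log" = (out, true, v) := by
            simp [bStep, bChain, chars_log]
          match r with
          | [] =>
            rw [go_cons_log_nil, insert_log]
            simp [List.foldl_cons, hsA]
          | nxt :: r2 =>
            by_cases h3 : PySem.Chars.startswith nxt.toList ['-'] = true
            · rw [go_cons_log_dash nxt r2 out _ h3, insert_log, ih (nxt :: r2) h]
              have hsB : bStep (out, true, v) nxt = bChain out (some "__AUTO__") nxt := by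
                simp [bStep, h3]
              have hsC : bStep (out, false, some "__AUTO__") nxt = bChain out (some "__AUTO__") nxt := by
                simp [bStep]
              simp only [List.foldl_cons, hsA, hsB, hsC]
            · rw [go_cons_log_val nxt r2 out _ (by simpa using h3), insert_log,
                ih r2 (by simp at h; omega)]
              have hsB : bStep (out, true, v) nxt = (out, false, some nxt) := by
                simp [bStep, h3]
              simp only [List.foldl_cons, hsA, hsB]
        · rw [go_cons_other a r out _ (by simpa using h1) h2, ih r h]
          have hs : bStep (out, false, v) a = (out ++ [a], false, v) := by
            simp [bStep, bChain, h1, h2]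
          simp only [List.foldl_cons, hs]

-- ===== VERDICT (by name: the statement is the Claim_ definition above) =====
theorem strip_log_args_from_argv_spec : Claim_equal_strip_log_args_from_argv := by
  intro argv _
  unfold Spec_strip_log_args_from_argv strip_log_args_from_argv strip_log_args_from_argv_alt
  have : PySem.Dict.ofList [(("log" : String), (none : Option String))] =
      PySem.Dict.mk [("log", none)] := by decide
  rw [this, go_eq argv.length argv le_rfl]
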